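-- pv_equiv track=rewrite | github.com/facebook/sapling | slides/201904-segmented-changelog/segmented-changelog.py | segflat
-- ===== SOURCE A (Python) =====
-- def segflat(revs, parentrevs):
--     """([rev], {rev: parents}) -> [(start, end, parents)]"""
--     start = None  # current segment
--     segs = []  # [(start, end)]
--     for rev in revs:
--         prevs = parentrevs[rev]
--         if prevs != [rev - 1]:
--             # Start a new segment
--             if start is not None:
--                 segs.append((start, rev - 1, parentrevs[start]))
--             start = rev
--     segs.append((start, revs[-1], sorted(parentrevs[start])))
--     return segs
-- ===== SOURCE B (Python) =====
-- def segflat(revs, parentrevs):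
--     """([rev], {rev: parents}) -> [(start, end, parents)]"""
--     # 1) materialise the boundary revs (those not continuing a flat run)
--     starts = [rev for rev in revs if parentrevs[rev] != [rev - 1]]
--     # 2) pair consecutive boundaries: each segment ends just before the next boundary
--     segs = [(s, n - 1, parentrevs[s]) for s, n in zip(starts, starts[1:])]
--     # 3) the final open segment runs to the last rev; its parents are sorted
--     if starts:
--         last = starts[-1]
--         segs.append((last, revs[-1], sorted(parentrevs[last])))
--     return segs
-- ===== Notes on version B (the rewrite author's own statement) =====
-- stated objective: simpler
-- what changed: Replaces A's single-pass delayed-append accumulator (carrying the open segment's start across iterations) by three declarative steps: materialise the boundary list, pair consecutive boundaries into segments, then close the final segment.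
import Mathlib
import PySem

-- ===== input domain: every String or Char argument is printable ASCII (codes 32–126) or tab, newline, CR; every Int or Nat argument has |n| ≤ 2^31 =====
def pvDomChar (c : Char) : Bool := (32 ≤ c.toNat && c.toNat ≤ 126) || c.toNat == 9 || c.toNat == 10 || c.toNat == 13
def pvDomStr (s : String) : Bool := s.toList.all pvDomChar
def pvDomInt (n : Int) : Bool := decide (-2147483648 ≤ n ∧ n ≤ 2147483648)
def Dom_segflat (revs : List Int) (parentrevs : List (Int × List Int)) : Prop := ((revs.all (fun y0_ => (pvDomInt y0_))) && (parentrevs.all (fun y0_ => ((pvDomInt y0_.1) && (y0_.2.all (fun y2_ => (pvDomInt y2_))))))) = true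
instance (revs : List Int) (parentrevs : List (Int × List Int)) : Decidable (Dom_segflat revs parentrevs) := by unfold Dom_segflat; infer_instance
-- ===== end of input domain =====

-- B replaces A's delayed-append single-pass accumulator by materialising the boundary list
-- and pairing consecutive boundaries; same O(n) cost, simpler decomposition. Return value only.

-- dict subscript parentrevs[rev]: first match in the association list (total here via getD;
-- Pre_segflat guarantees the key is present wherever Python reads it)
def pvLook (parentrevs : List (Int × List Int)) (k : Int) : List Int :=
  (List.lookup k parentrevs).getD []

-- ===== PORT A =====
def segflat (revs : List Int) (parentrevs : List (Int × List Int)) : List (Int × Int × List Int) :=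
  let st := revs.foldl (fun (st : Option Int × List (Int × Int × List Int)) rev =>
      let prevs := pvLook parentrevs rev
      if prevs ≠ [rev - 1] then
        match st.1 with
        | some s => (some rev, st.2 ++ [(s, rev - 1, pvLook parentrevs s)])
        | none => (some rev, st.2)
      else st) (none, [])
  match st.1 with
  | some s => st.2 ++ [(s, (revs.getLast?).getD 0, PySem.List.sorted (pvLook parentrevs s) (fun x => x) false)]
  | none => st.2  -- Python raises KeyError here (excluded by Pre_segflat)

-- ===== PORT B =====
def segflat_alt (revs : List Int) (parentrevs : List (Int × List Int)) : List (Int × Int × List Int) :=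
  let starts := revs.filter (fun rev => pvLook parentrevs rev ≠ [rev - 1])
  let segs := (starts.zip starts.tail).map (fun p => (p.1, p.2 - 1, pvLook parentrevs p.1))
  match starts.getLast? with
  | some last => segs ++ [(last, (revs.getLast?).getD 0, PySem.List.sorted (pvLook parentrevs last) (fun x => x) false)]
  | none => segs

-- ===== PRECONDITION & SPEC =====
-- Pre_ excludes exactly the inputs where Python A raises: empty revs (IndexError on revs[-1]),
-- a rev missing from parentrevs (KeyError), and the no-boundary case where start stays None
-- (KeyError on parentrevs[None]).
def Pre_segflat (revs : List Int) (parentrevs : List (Int × List Int)) : Prop :=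
  revs ≠ [] ∧ (∀ r ∈ revs, (List.lookup r parentrevs).isSome = true) ∧
  (∃ r ∈ revs, pvLook parentrevs r ≠ [r - 1])
instance (revs : List Int) (parentrevs : List (Int × List Int)) : Decidable (Pre_segflat revs parentrevs) := by unfold Pre_segflat; infer_instance

def pvWitness_segflat : List Int × (List (Int × List Int)) :=
  ([0, 1, 2, 5], [(0, []), (1, [0]), (2, [1]), (5, [2, 1])])

def Spec_segflat (revs : List Int) (parentrevs : List (Int × List Int)) (out : List (Int × Int × List Int)) : Prop := out = segflat_alt revs parentrevs
instance (revs : List Int) (parentrevs : List (Int × List Int)) (out : List (Int × Int × List Int)) : Decidable (Spec_segflat revs parentrevs out) := by unfold Spec_segflat; infer_instance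

-- ===== CLAIM (what is proved, stated in full; the proofs are below) =====
def Claim_equal_segflat : Prop := ∀ (revs : List Int) (parentrevs : List (Int × List Int)), Dom_segflat revs parentrevs → Pre_segflat revs parentrevs → Spec_segflat revs parentrevs (segflat revs parentrevs)

-- ===== LEMMAS AND PROOFS =====

-- the segments generated by the boundary chain s :: l (pairing consecutive boundaries)
def pvChain (parentrevs : List (Int × List Int)) : Int → List Int → List (Int × Int × List Int)
  | _, [] => []
  | s, b :: l => (s, b - 1, pvLook parentrevs s) :: pvChain parentrevs b l

-- last boundary of the chain s :: l
def pvLastB : Int → List Int → Int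
  | s, [] => s
  | _, b :: l => pvLastB b l

theorem pvChain_eq_zip (parentrevs : List (Int × List Int)) (s : Int) (l : List Int) :
    pvChain parentrevs s l
      = (((s :: l).zip l).map (fun p => (p.1, p.2 - 1, pvLook parentrevs p.1))) := by
  induction l generalizing s with
  | nil => rfl
  | cons b l ih => simp [pvChain, ih b, List.zip]

theorem pvLastB_eq (s : Int) (l : List Int) : (s :: l).getLast? = some (pvLastB s l) := by
  induction l generalizing s with
  | nil => rfl
  | cons b l ih => simpa [pvLastB] using ih b

-- loop invariant for A's fold, started with an open segment `s`
theorem segflat_fold_some (parentrevs : List (Int × List Int)) (revs : List Int)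
    (s : Int) (acc : List (Int × Int × List Int)) :
    revs.foldl (fun (st : Option Int × List (Int × Int × List Int)) rev =>
      let prevs := pvLook parentrevs rev
      if prevs ≠ [rev - 1] then
        match st.1 with
        | some s => (some rev, st.2 ++ [(s, rev - 1, pvLook parentrevs s)])
        | none => (some rev, st.2)
      else st) (some s, acc)
    = (some (pvLastB s (revs.filter (fun rev => pvLook parentrevs rev ≠ [rev - 1]))),
       acc ++ pvChain parentrevs s (revs.filter (fun rev => pvLook parentrevs rev ≠ [rev - 1]))) := by
  induction revs generalizing s acc with
  | nil => simp [pvLastB, pvChain]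
  | cons r rest ih =>
    simp only [ne_eq, decide_not, ite_not] at ih ⊢
    simp only [List.foldl_cons, List.filter_cons]
    by_cases h : pvLook parentrevs r = [r - 1]
    · simp [h, ih]
    · simp [h, ih, pvLastB, pvChain]

-- A's fold from the initial (None, []) state
theorem segflat_fold_none (parentrevs : List (Int × List Int)) (revs : List Int) :
    revs.foldl (fun (st : Option Int × List (Int × Int × List Int)) rev =>
      let prevs := pvLook parentrevs rev
      if prevs ≠ [rev - 1] then
        match st.1 with
        | some s => (some rev, st.2 ++ [(s, rev - 1, pvLook parentrevs s)])
        | none => (some rev, st.2)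
      else st) (none, [])
    = (match revs.filter (fun rev => pvLook parentrevs rev ≠ [rev - 1]) with
       | [] => (none, [])
       | s :: l => (some (pvLastB s l), pvChain parentrevs s l)) := by
  induction revs with
  | nil => rfl
  | cons r rest ih =>
    simp only [ne_eq, decide_not, ite_not] at ih ⊢
    simp only [List.foldl_cons, List.filter_cons]
    by_cases h : pvLook parentrevs r = [r - 1]
    · simp [h, ih]
    · have hs := segflat_fold_some parentrevs rest r []
      simp only [ne_eq, decide_not, ite_not] at hs
      simp [h, hs]

-- ===== VERDICT (by name: the statement is the Claim_ definition above) =====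
theorem segflat_spec : Claim_equal_segflat := by
  intro revs parentrevs _ _
  unfold Spec_segflat segflat segflat_alt
  rw [segflat_fold_none]
  cases hf : revs.filter (fun rev => pvLook parentrevs rev ≠ [rev - 1]) with
  | nil => simp
  | cons s l =>
    simp only [pvLastB_eq s l, pvChain_eq_zip]
    rfl
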